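-- pv_equiv track=rewrite | github.com/rmalinowska/ASD | zad2.py | gen_array
-- ===== SOURCE A (Python) =====
-- def gen_array(n):
--     """ funkcja generująca info4 dla rozwiązania tablicowego """
--     array = [1 for _ in range(n + 1)]
--     num = 1
--     for i in range(n + 1):
--         if i == num:
--             array[num] = 0
--             num += 3
--     return array
-- ===== SOURCE B (Python) =====
-- def gen_array(n):
--     """ funkcja generujaca info4 dla rozwiazania tablicowego """
--     array = [1] * (n + 1)
--     for j in range(1, n + 1, 3):
--         array[j] = 0
--     return array
-- ===== Notes on version B (the rewrite author's own statement) =====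
-- stated objective: simpler
-- what changed: B drops A's per-index scan with its maintained num counter and instead fills the list with ones once and zeroes only every third position via a strided range loop.
import Mathlib
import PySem

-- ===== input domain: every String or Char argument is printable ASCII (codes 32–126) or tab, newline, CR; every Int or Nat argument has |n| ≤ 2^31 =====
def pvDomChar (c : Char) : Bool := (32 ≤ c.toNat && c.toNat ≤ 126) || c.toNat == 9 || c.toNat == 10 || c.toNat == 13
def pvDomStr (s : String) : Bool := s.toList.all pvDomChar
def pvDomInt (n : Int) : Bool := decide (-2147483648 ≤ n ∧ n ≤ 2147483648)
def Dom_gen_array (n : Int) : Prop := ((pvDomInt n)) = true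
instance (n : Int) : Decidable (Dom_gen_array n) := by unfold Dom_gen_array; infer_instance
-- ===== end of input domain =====

-- B replaces A's full index scan with a counter by a one-shot fill of ones plus a
-- strided loop zeroing only positions 1, 4, 7, …; objective: simpler.

-- ===== PORT A =====
-- loop body of A's 'for i in range(n + 1)': state is (array, num);
-- 'array[num] = 0' is List.set at num.toNat — exact here since num = i ≥ 0 and in range
def genStep (st : List Int × Int) (i : Int) : List Int × Int :=
  if i = st.2 then (st.1.set st.2.toNat 0, st.2 + 3) else st

def gen_array (n : Int) : List Int :=
  let array : List Int := (PySem.List.pyRange 0 (n + 1) 1).map (fun _ => (1 : Int))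
  let res := (PySem.List.pyRange 0 (n + 1) 1).foldl genStep (array, 1)
  res.1

-- ===== PORT B =====
def gen_array_alt (n : Int) : List Int :=
  let array : List Int := List.replicate (n + 1).toNat 1   -- [1] * (n + 1)
  (PySem.List.pyRange 1 (n + 1) 3).foldl (fun a j => a.set j.toNat 0) array

-- ===== PRECONDITION & SPEC =====
def Spec_gen_array (n : Int) (out : List Int) : Prop := out = gen_array_alt n
instance (n : Int) (out : List Int) : Decidable (Spec_gen_array n out) := by unfold Spec_gen_array; infer_instance

-- ===== CLAIM (what is proved, stated in full; the proofs are below) =====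
def Claim_equal_gen_array : Prop := ∀ (n : Int), Dom_gen_array n → Spec_gen_array n (gen_array n)

-- ===== LEMMAS AND PROOFS =====

-- all-ones list of length M
def onesL (M : Nat) : List Int := (List.range M).map (fun _ => 1)

-- value at index i after A has processed indices 0 .. m-1
def fA (m i : Nat) : Int := if i < m ∧ i % 3 = 1 then 0 else 1

-- A's 'num' counter after processing indices 0 .. m-1
def numF (m : Nat) : Int := 3 * (((m : Int) + 1) / 3) + 1

-- value at index i after B has zeroed positions 1+3k for k < c
def fB (c i : Nat) : Int := if i % 3 = 1 ∧ i < 1 + 3 * c then 0 else 1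

lemma set_zero (M j : Nat) (f : Nat → Int) :
    ((List.range M).map f).set j 0 = (List.range M).map (fun i => if i = j then 0 else f i) := by
  apply List.ext_getElem
  · simp
  · intro i h1 h2
    simp only [List.getElem_set, List.getElem_map, List.getElem_range]
    by_cases h : j = i <;> simp [h, Ne.symm]

lemma foldA (m M : Nat) (hmM : m ≤ M) :
    (PySem.List.pyRange 0 (m : Int) 1).foldl genStep (onesL M, 1)
      = ((List.range M).map (fun i => fA m i), numF m) := by
  induction m with
  | zero =>
    simp [PySem.List.pyRange_one_eq_nil (by omega : (0:Int) ≤ 0), onesL, fA, numF]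
  | succ m ih =>
    have hcast : ((m + 1 : Nat) : Int) = (m : Int) + 1 := by push_cast; ring
    rw [hcast, PySem.List.pyRange_one_succ_right (by positivity : (0:Int) ≤ (m:Int)),
        List.foldl_append, ih (by omega)]
    simp only [List.foldl_cons, List.foldl_nil]
    unfold genStep
    split_ifs with h'
    · have h : (m : Int) = numF m := h'
      have hm3 : m % 3 = 1 := by unfold numF at h; omega
      have ht : (numF m).toNat = m := by omega
      have e1 : (List.map (fun i => fA m i) (List.range M)).set (numF m).toNat 0
          = List.map (fun i => fA (m + 1) i) (List.range M) := by
        rw [ht, set_zero]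
        apply List.map_congr_left
        intro i hi
        simp only [List.mem_range] at hi
        unfold fA
        by_cases hx : i = m <;> split_ifs <;> omega
      have e2 : numF m + 3 = numF (m + 1) := by
        unfold numF
        push_cast
        omega
      exact Prod.ext e1 e2
    · have h : ¬ (m : Int) = numF m := h'
      have hm3 : m % 3 ≠ 1 := by
        intro hc
        exact h (by unfold numF; omega)
      have e1 : List.map (fun i => fA m i) (List.range M)
          = List.map (fun i => fA (m + 1) i) (List.range M) := by
        apply List.map_congr_left
        intro i hi
        simp only [List.mem_range] at hi
        unfold fA
        split_ifs <;> omega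
      have e2 : numF m = numF (m + 1) := by
        unfold numF
        push_cast
        omega
      exact Prod.ext e1 e2

lemma foldB (c M : Nat) :
    ((List.range c).map (fun k : Nat => (1 : Int) + 3 * (k : Int))).foldl (fun a j => a.set j.toNat 0) (onesL M)
      = (List.range M).map (fun i => fB c i) := by
  induction c with
  | zero =>
    simp only [List.range_zero, List.map_nil, List.foldl_nil, onesL]
    apply List.map_congr_left
    intro i hi
    unfold fB
    split_ifs with h
    · omega
    · rfl
  | succ c ih =>
    rw [List.range_succ, List.map_append, List.foldl_append, ih]
    simp only [List.map_cons, List.map_nil, List.foldl_cons, List.foldl_nil]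
    have ht : ((1 : Int) + 3 * c).toNat = 1 + 3 * c := by omega
    rw [ht, set_zero]
    apply List.map_congr_left
    intro i hi
    simp only [List.mem_range] at hi
    unfold fB
    by_cases h : i = 1 + 3 * c <;> [skip; skip] <;> split_ifs <;> omega

lemma gen_array_eq (n : Int) :
    gen_array n = (List.range (n + 1).toNat).map (fun i => fA (n + 1).toNat i) := by
  unfold gen_array
  have hr : PySem.List.pyRange 0 (n + 1) 1 = PySem.List.pyRange 0 (((n + 1).toNat : Int)) 1 := by
    rw [PySem.List.pyRange_one, PySem.List.pyRange_one]
    congr 2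
    omega
  have hones : (PySem.List.pyRange 0 (((n+1).toNat : Int)) 1).map (fun _ => (1:Int)) = onesL (n+1).toNat := by
    rw [PySem.List.pyRange_one, List.map_map]
    unfold onesL
    congr 1
  simp only [hr, hones, foldA (n+1).toNat (n+1).toNat le_rfl]

lemma gen_array_alt_eq (n : Int) :
    gen_array_alt n = (List.range (n + 1).toNat).map
      (fun i => fB (if 1 < n + 1 then ((n + 2) / 3).toNat else 0) i) := by
  unfold gen_array_alt
  rw [PySem.List.pyRange_of_pos 1 (n+1) (by norm_num : (0:Int) < 3)]
  have hb : (n + 1 - 1 + 3 - 1) = n + 2 := by ring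
  rw [hb]
  have hrep : List.replicate (n + 1).toNat (1 : Int) = onesL (n + 1).toNat := by
    unfold onesL
    simp [List.map_const']
  rw [hrep]
  exact foldB _ _

-- ===== VERDICT (by name: the statement is the Claim_ definition above) =====
theorem gen_array_spec : Claim_equal_gen_array := by
  intro n _
  unfold Spec_gen_array
  rw [gen_array_eq, gen_array_alt_eq]
  apply List.map_congr_left
  intro i hi
  simp only [List.mem_range] at hi
  unfold fA fB
  split_ifs <;> first | rfl | omega
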